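-- pv_equiv track=rewrite | github.com/risi-kondor/GElib | python/src/gelib/SO3vecArr.py | CGproductType
-- ===== SOURCE A (Python) =====
-- from typing import Iterable, List, Optional
--
-- def CGproductType(x, y, maxl : Optional[int] = -1):
--     if maxl==-1:
--         maxl=len(x)+len(y)-2
--     r=[0]*(maxl+1)
--     for l1 in range(0,len(x)):
--         for l2 in range(0,len(y)):
--             for l in range(abs(l1-l2),min(l1+l2,maxl)+1):
--                 r[l]+=x[l1]*y[l2]
--     return r
-- ===== SOURCE B (Python) =====
-- def CGproductType(x, y, maxl=-1):
--     if maxl == -1: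
--         maxl = len(x) + len(y) - 2
--     n = maxl + 1
--     diff = [0] * (n + 1)
--     for l1, a in enumerate(x):
--         for l2, b in enumerate(y):
--             lo = abs(l1 - l2)
--             hi = min(l1 + l2, maxl)
--             if lo <= hi:
--                 v = a * b
--                 diff[lo] += v
--                 diff[hi + 1] -= v
--     out = []
--     acc = 0
--     for d in diff[:n]:
--         acc += d
--         out.append(acc)
--     return out
-- ===== Notes on version B (the rewrite author's own statement) =====
-- stated objective: faster
-- what changed: Replaces A's inner per-l accumulation loop by a difference array: each (l1,l2) pair does one range-add in O(1), and a single prefix-sum pass produces the result, O(|x|*|y|+maxl) instead of O(|x|*|y|*maxl).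
import Mathlib
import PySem

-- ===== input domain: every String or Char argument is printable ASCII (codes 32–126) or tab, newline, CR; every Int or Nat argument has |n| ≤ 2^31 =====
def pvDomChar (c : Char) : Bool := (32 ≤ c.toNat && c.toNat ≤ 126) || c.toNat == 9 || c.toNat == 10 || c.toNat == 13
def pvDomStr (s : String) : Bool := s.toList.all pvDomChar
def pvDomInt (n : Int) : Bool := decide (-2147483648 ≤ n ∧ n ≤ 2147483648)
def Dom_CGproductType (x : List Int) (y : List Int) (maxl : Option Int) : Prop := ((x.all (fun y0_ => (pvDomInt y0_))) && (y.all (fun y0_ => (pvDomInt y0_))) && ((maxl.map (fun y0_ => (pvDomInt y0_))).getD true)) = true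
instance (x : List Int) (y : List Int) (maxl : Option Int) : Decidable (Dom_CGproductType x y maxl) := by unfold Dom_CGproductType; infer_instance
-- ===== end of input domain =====

-- B replaces A's innermost per-l accumulation loop by a difference array (one O(1) range-add
-- per (l1,l2) pair, then a single prefix-sum pass): O(|x|*|y| + maxl) instead of O(|x|*|y|*maxl).

-- ===== PORT A =====
-- Literal port of A's triple loop; `r[l] += x[l1]*y[l2]` is pyGetD/pySetD (indices always in range).
def CGproductType (x : List Int) (y : List Int) (maxl : Option Int) : List Int :=
  match maxl with
  | none => []   -- Python raises TypeError on maxl=None; excluded by Pre_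
  | some maxl0 =>
    let m : Int := if maxl0 = -1 then (x.length : Int) + (y.length : Int) - 2 else maxl0
    (PySem.List.pyRange 0 (x.length : Int) 1).foldl (fun r l1 =>
      (PySem.List.pyRange 0 (y.length : Int) 1).foldl (fun r l2 =>
        (PySem.List.pyRange |l1 - l2| (min (l1 + l2) m + 1) 1).foldl (fun r l =>
          PySem.List.pySetD r l (PySem.List.pyGetD r l 0 + PySem.List.pyGetD x l1 0 * PySem.List.pyGetD y l2 0)) r) r)
      (List.replicate (m + 1).toNat 0)

-- ===== PORT B =====
-- Literal port of Source B: difference array built over enumerate(x) × enumerate(y), then a prefix-sum pass.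
def CGproductType_alt (x : List Int) (y : List Int) (maxl : Option Int) : List Int :=
  match maxl with
  | none => []   -- B's Python also raises TypeError on maxl=None; excluded by Pre_
  | some maxl0 =>
    let m : Int := if maxl0 = -1 then (x.length : Int) + (y.length : Int) - 2 else maxl0
    let n : Int := m + 1
    let diff := (PySem.List.enumerate x 0).foldl (fun diff p =>
      (PySem.List.enumerate y 0).foldl (fun diff q =>
        let lo : Int := |p.1 - q.1|
        let hi : Int := min (p.1 + q.1) m
        if lo ≤ hi then
          let v := p.2 * q.2
          let d1 := PySem.List.pySetD diff lo (PySem.List.pyGetD diff lo 0 + v)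
          PySem.List.pySetD d1 (hi + 1) (PySem.List.pyGetD d1 (hi + 1) 0 - v)
        else diff) diff)
      (List.replicate (n + 1).toNat 0)
    ((PySem.List.slice diff none (some n)).foldl
      (fun (st : List Int × Int) d => (st.1 ++ [st.2 + d], st.2 + d)) ([], 0)).1

-- ===== PRECONDITION & SPEC =====
-- Pre_ excludes only maxl = None, on which Python A raises TypeError (None == -1 is False, then None+1 fails).
def Pre_CGproductType (x : List Int) (y : List Int) (maxl : Option Int) : Prop := maxl ≠ none
instance (x : List Int) (y : List Int) (maxl : Option Int) : Decidable (Pre_CGproductType x y maxl) := by unfold Pre_CGproductType; infer_instance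
def pvWitness_CGproductType : List Int × List Int × Option Int := ([1, 2], [1], some 3)

def Spec_CGproductType (x : List Int) (y : List Int) (maxl : Option Int) (out : List Int) : Prop := out = CGproductType_alt x y maxl
instance (x : List Int) (y : List Int) (maxl : Option Int) (out : List Int) : Decidable (Spec_CGproductType x y maxl out) := by unfold Spec_CGproductType; infer_instance

-- ===== CLAIM (what is proved, stated in full; the proofs are below) =====
def Claim_equal_CGproductType : Prop := ∀ (x : List Int) (y : List Int) (maxl : Option Int), Dom_CGproductType x y maxl → Pre_CGproductType x y maxl → Spec_CGproductType x y maxl (CGproductType x y maxl)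


-- ===== LEMMAS AND PROOFS =====

-- prefix sums (proof-side characterisation of B's final pass)
def pvPsum (acc : Int) : List Int → List Int
  | [] => []
  | d :: ds => (acc + d) :: pvPsum (acc + d) ds

-- partial sum of the first j+1 entries of the difference array
def pvPsumAt (d : List Int) (j : Nat) : Int := ∑ i ∈ Finset.range (j + 1), d.getD i 0

-- the invariant tying A's state r to B's difference array d
def pvInv (N : Nat) (r d : List Int) : Prop :=
  r.length = N ∧ d.length = N + 1 ∧ ∀ j : Nat, j < N → r.getD j 0 = pvPsumAt d j

lemma pvFoldl_rel {α β γ : Type} (R : β → γ → Prop) (fA : β → α → β) (fB : γ → α → γ) :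
    ∀ (l : List α), (∀ a ∈ l, ∀ b c, R b c → R (fA b a) (fB c a)) →
    ∀ {b : β} {c : γ}, R b c → R (l.foldl fA b) (l.foldl fB c) := by
  intro l
  induction l with
  | nil => intro _ _ _ h; exact h
  | cons a t ih =>
    intro h b c hbc
    exact ih (fun a' ha' => h a' (List.mem_cons_of_mem _ ha')) (h a List.mem_cons_self b c hbc)

lemma pvReadout (ds : List Int) : ∀ (out : List Int) (acc : Int),
    (ds.foldl (fun (st : List Int × Int) d => (st.1 ++ [st.2 + d], st.2 + d)) (out, acc)).1
      = out ++ pvPsum acc ds := by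
  induction ds with
  | nil => intro out acc; simp [pvPsum]
  | cons d t ih => intro out acc; simp [pvPsum, ih (out ++ [acc + d]) (acc + d)]

lemma pvPsum_length (ds : List Int) : ∀ acc, (pvPsum acc ds).length = ds.length := by
  induction ds with
  | nil => intro; rfl
  | cons d t ih => intro acc; simp [pvPsum, ih]

lemma pvPsumAt_cons (d : Int) (t : List Int) (j : Nat) :
    pvPsumAt (d :: t) (j + 1) = d + pvPsumAt t j := by
  unfold pvPsumAt
  rw [Finset.sum_range_succ' (fun i => (d :: t).getD i 0) (j + 1)]
  simp [add_comm]

lemma pvPsum_getD : ∀ (ds : List Int) (acc : Int) (j : Nat), j < ds.length →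
    (pvPsum acc ds).getD j 0 = acc + pvPsumAt ds j := by
  intro ds
  induction ds with
  | nil => intro acc j h; simp at h
  | cons d t ih =>
    intro acc j h
    cases j with
    | zero => simp [pvPsum, pvPsumAt]
    | succ j =>
      have hj : j < t.length := by simpa using h
      rw [pvPsumAt_cons]
      show (pvPsum (acc + d) t).getD j 0 = acc + (d + pvPsumAt t j)
      rw [ih (acc + d) j hj]; ring

-- range-add: A's innermost loop adds v to every r[l] with lo ≤ l ≤ hi
lemma pvRangeAdd (v : Int) : ∀ (k : Nat) (hi lo : Int) (r : List Int), 0 ≤ lo → hi < (r.length : Int) →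
    k = (hi + 1 - lo).toNat →
    ((PySem.List.pyRange lo (hi + 1) 1).foldl (fun r l =>
        PySem.List.pySetD r l (PySem.List.pyGetD r l 0 + v)) r).length = r.length ∧
    ∀ j : Nat, ((PySem.List.pyRange lo (hi + 1) 1).foldl (fun r l =>
        PySem.List.pySetD r l (PySem.List.pyGetD r l 0 + v)) r).getD j 0
      = r.getD j 0 + (if lo ≤ (j : Int) ∧ (j : Int) ≤ hi then v else 0) := by
  intro k
  induction k with
  | zero =>
    intro hi lo r h0 hlen hk
    rw [PySem.List.pyRange_one_eq_nil (by omega)]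
    refine ⟨rfl, fun j => ?_⟩
    have hno : ¬ (lo ≤ (j : Int) ∧ (j : Int) ≤ hi) := by omega
    rw [if_neg hno, add_zero]
    rfl
  | succ k ih =>
    intro hi lo r h0 hlen hk
    have hab : lo ≤ hi := by omega
    have h0hi : 0 ≤ hi := le_trans h0 hab
    obtain ⟨ihl, ihe⟩ := ih (hi - 1) lo r h0 (by omega) (by omega)
    have e : hi - 1 + 1 = hi := by omega
    rw [e] at ihl ihe
    rw [PySem.List.pyRange_one_succ_right hab, List.foldl_append]
    simp only [List.foldl_cons, List.foldl_nil]
    rw [PySem.List.pySetD_of_nonneg _ _ h0hi]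
    refine ⟨by rw [List.length_set, ihl], fun j => ?_⟩
    rw [List.getD_eq_getElem?_getD, List.getElem?_set]
    by_cases hj : hi.toNat = j
    · subst hj
      have hlt : hi.toNat < ((PySem.List.pyRange lo hi 1).foldl (fun r l =>
          PySem.List.pySetD r l (PySem.List.pyGetD r l 0 + v)) r).length := by
        rw [ihl]; omega
      rw [if_pos rfl, if_pos hlt]
      rw [PySem.List.pyGetD_of_nonneg _ _ h0hi]
      have hcast : ((hi.toNat : Int)) = hi := by omega
      rw [Option.getD_some, ihe hi.toNat, hcast]
      have c1 : ¬ (lo ≤ hi ∧ hi ≤ hi - 1) := by omega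
      have c2 : lo ≤ hi ∧ hi ≤ hi := by omega
      rw [if_neg c1, if_pos c2, add_zero]
    · rw [if_neg hj]
      rw [← List.getD_eq_getElem?_getD, ihe j]
      have : ((j : Int) ≤ hi - 1) ↔ ((j : Int) ≤ hi) := by omega
      by_cases hc : lo ≤ (j : Int) ∧ (j : Int) ≤ hi
      · rw [if_pos ⟨hc.1, by omega⟩, if_pos hc]
      · rw [if_neg (by omega), if_neg hc]

-- B's pair update, pointwise on the difference array
lemma pvDiffUpd (d : List Int) (lo hi v : Int) (h0 : 0 ≤ lo) (hlh : lo ≤ hi)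
    (hhi : hi + 1 < (d.length : Int)) :
    (PySem.List.pySetD (PySem.List.pySetD d lo (PySem.List.pyGetD d lo 0 + v)) (hi + 1)
        (PySem.List.pyGetD (PySem.List.pySetD d lo (PySem.List.pyGetD d lo 0 + v)) (hi + 1) 0 - v)).length = d.length ∧
    ∀ j : Nat, (PySem.List.pySetD (PySem.List.pySetD d lo (PySem.List.pyGetD d lo 0 + v)) (hi + 1)
        (PySem.List.pyGetD (PySem.List.pySetD d lo (PySem.List.pyGetD d lo 0 + v)) (hi + 1) 0 - v)).getD j 0
      = d.getD j 0 + (if (j : Int) = lo then v else 0) - (if (j : Int) = hi + 1 then v else 0) := by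
  have h0h : (0 : Int) ≤ hi + 1 := by omega
  rw [PySem.List.pySetD_of_nonneg _ _ h0, PySem.List.pySetD_of_nonneg _ _ h0h,
      PySem.List.pyGetD_of_nonneg _ _ h0, PySem.List.pyGetD_of_nonneg _ _ h0h]
  have hlolen : lo.toNat < d.length := by omega
  have hhilen : (hi + 1).toNat < d.length := by omega
  have hne : lo.toNat ≠ (hi + 1).toNat := by omega
  constructor
  · simp
  · intro j
    simp only [List.getD_eq_getElem?_getD, List.getElem?_set, List.length_set]
    rw [if_neg hne]
    by_cases hj1 : (hi + 1).toNat = j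
    · subst hj1
      rw [if_pos rfl, if_pos hhilen, Option.getD_some,
          if_neg (show ¬ ((((hi + 1).toNat : Nat) : Int) = lo) by omega),
          if_pos (show (((hi + 1).toNat : Nat) : Int) = hi + 1 by omega)]
      ring
    · rw [if_neg hj1]
      by_cases hj2 : lo.toNat = j
      · subst hj2
        rw [if_pos rfl, if_pos hlolen, Option.getD_some,
            if_pos (show ((lo.toNat : Nat) : Int) = lo by omega),
            if_neg (show ¬ (((lo.toNat : Nat) : Int) = hi + 1) by omega)]
        ring
      · rw [if_neg hj2,
            if_neg (show ¬ ((j : Int) = lo) by omega),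
            if_neg (show ¬ ((j : Int) = hi + 1) by omega)]
        ring

lemma pvSumIte (c v : Int) (hc : 0 ≤ c) (j : Nat) :
    (∑ i ∈ Finset.range (j + 1), if (i : Int) = c then v else 0) = if c ≤ (j : Int) then v else 0 := by
  have step : ∀ i ∈ Finset.range (j + 1), (if (i : Int) = c then v else 0) = if i = c.toNat then v else 0 := by
    intro i _
    have : ((i : Int) = c) ↔ (i = c.toNat) := by omega
    simp [this]
  rw [Finset.sum_congr rfl step, Finset.sum_ite_eq' (Finset.range (j + 1)) c.toNat (fun _ => v)]
  simp only [Finset.mem_range]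
  split_ifs <;> omega

-- the per-pair step preserves the invariant
lemma pvPairStep (N : Nat) (m l1 l2 v : Int) (hm : (N : Int) = m + 1)
    (h1 : 0 ≤ l1) (h2 : 0 ≤ l2) (r d : List Int) (hInv : pvInv N r d) :
    pvInv N
      ((PySem.List.pyRange |l1 - l2| (min (l1 + l2) m + 1) 1).foldl (fun r l =>
          PySem.List.pySetD r l (PySem.List.pyGetD r l 0 + v)) r)
      (if |l1 - l2| ≤ min (l1 + l2) m then
        PySem.List.pySetD (PySem.List.pySetD d |l1 - l2| (PySem.List.pyGetD d |l1 - l2| 0 + v)) (min (l1 + l2) m + 1)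
          (PySem.List.pyGetD (PySem.List.pySetD d |l1 - l2| (PySem.List.pyGetD d |l1 - l2| 0 + v)) (min (l1 + l2) m + 1) 0 - v)
      else d) := by
  obtain ⟨hr, hd, hinv⟩ := hInv
  have h0lo : (0 : Int) ≤ |l1 - l2| := abs_nonneg _
  by_cases hc : |l1 - l2| ≤ min (l1 + l2) m
  · rw [if_pos hc]
    have hmle : min (l1 + l2) m ≤ m := min_le_right _ _
    have hhilen : min (l1 + l2) m < (r.length : Int) := by rw [hr]; omega
    obtain ⟨hL, hE⟩ := pvRangeAdd v (min (l1 + l2) m + 1 - |l1 - l2|).toNat (min (l1 + l2) m) |l1 - l2| r h0lo hhilen rfl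
    obtain ⟨hL2, hE2⟩ := pvDiffUpd d (|l1 - l2|) (min (l1 + l2) m) v h0lo hc (by rw [hd]; push_cast; omega)
    refine ⟨by rw [hL, hr], by rw [hL2, hd], fun j hj => ?_⟩
    rw [hE j, hinv j hj]
    unfold pvPsumAt
    rw [Finset.sum_congr rfl (fun i _ => hE2 i), Finset.sum_sub_distrib, Finset.sum_add_distrib,
        pvSumIte (|l1 - l2|) v h0lo j, pvSumIte (min (l1 + l2) m + 1) v (by omega) j]
    split_ifs <;> omega
  · rw [if_neg hc]
    rw [PySem.List.pyRange_one_eq_nil (by omega)]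
    exact ⟨hr, hd, hinv⟩

lemma pvFoldl_pres {α β : Type} (P : β → Prop) (l : List α) (f : β → α → β)
    (h : ∀ b a, P b → P (f b a)) : ∀ b, P b → P (l.foldl f b) := by
  induction l with
  | nil => intro b hb; exact hb
  | cons a t ih => intro b hb; exact ih (f b a) (h b a hb)

lemma pvSliceNil {α : Type} (a b : Option Int) : PySem.List.slice ([] : List α) a b = [] := by
  simp [PySem.List.slice]

-- ===== VERDICT (by name: the statement is the Claim_ definition above) =====
theorem CGproductType_spec : Claim_equal_CGproductType := by
  intro x y maxl _hdom hpre
  unfold Spec_CGproductType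
  cases maxl with
  | none => exact absurd rfl hpre
  | some maxl0 =>
    simp only [CGproductType, CGproductType_alt]
    set m : Int := if maxl0 = -1 then (x.length : Int) + (y.length : Int) - 2 else maxl0 with hm
    by_cases hneg : m + 1 < 0
    · -- maxl ≤ -2 explicitly given: both programs return []
      suffices h : ((PySem.List.pyRange 0 (x.length : Int) 1).foldl (fun r l1 =>
            (PySem.List.pyRange 0 (y.length : Int) 1).foldl (fun r l2 =>
              (PySem.List.pyRange |l1 - l2| (min (l1 + l2) m + 1) 1).foldl (fun r l =>
                PySem.List.pySetD r l (PySem.List.pyGetD r l 0 + PySem.List.pyGetD x l1 0 * PySem.List.pyGetD y l2 0)) r) r)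
            (List.replicate (m + 1).toNat 0) = ([] : List Int))
          ∧ ((PySem.List.enumerate x 0).foldl (fun diff p =>
            (PySem.List.enumerate y 0).foldl (fun diff q =>
              if |p.1 - q.1| ≤ min (p.1 + q.1) m then
                PySem.List.pySetD (PySem.List.pySetD diff |p.1 - q.1| (PySem.List.pyGetD diff |p.1 - q.1| 0 + p.2 * q.2)) (min (p.1 + q.1) m + 1)
                  (PySem.List.pyGetD (PySem.List.pySetD diff |p.1 - q.1| (PySem.List.pyGetD diff |p.1 - q.1| 0 + p.2 * q.2)) (min (p.1 + q.1) m + 1) 0 - p.2 * q.2)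
              else diff) diff) (List.replicate (m + 1 + 1).toNat 0) = ([] : List Int)) by
        rw [h.1, h.2, pvSliceNil]
        rfl
      constructor
      · refine pvFoldl_pres (fun r => r = []) _ _ ?_ _ ?_
        · intro b l1 hb
          refine pvFoldl_pres (fun r => r = []) _ _ ?_ _ hb
          intro b' l2 hb'
          rw [PySem.List.pyRange_one_eq_nil (by
            have := min_le_right (l1 + l2) m
            have := abs_nonneg (l1 - l2)
            omega)]
          exact hb'
        · have e : (m + 1).toNat = 0 := by omega
          rw [e]; rfl
      · refine pvFoldl_pres (fun d => d = []) _ _ ?_ _ ?_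
        · intro b p hb
          refine pvFoldl_pres (fun d => d = []) _ _ ?_ _ hb
          intro b' q hb'
          rw [if_neg (by
            have := min_le_right (p.1 + q.1) m
            have := abs_nonneg (p.1 - q.1)
            omega)]
          exact hb'
        · have e : (m + 1 + 1).toNat = 0 := by omega
          rw [e]; rfl
    · -- maxl ≥ -1 : the difference-array invariant
      set N : Nat := (m + 1).toNat with hN
      have hNc : (N : Int) = m + 1 := by omega
      have hN1 : (m + 1 + 1).toNat = N + 1 := by omega
      have hInit : pvInv N (List.replicate (m + 1).toNat 0) (List.replicate (m + 1 + 1).toNat 0) := by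
        refine ⟨by simp [← hN], by simp [hN1], fun j hj => ?_⟩
        have h1 : (List.replicate (m + 1).toNat (0 : Int)).getD j 0 = 0 := by
          rw [List.getD_eq_getElem?_getD, List.getElem?_replicate]
          split_ifs <;> rfl
        have h2 : pvPsumAt (List.replicate (m + 1 + 1).toNat 0) j = 0 := by
          unfold pvPsumAt
          refine Finset.sum_eq_zero fun k _ => ?_
          rw [List.getD_eq_getElem?_getD, List.getElem?_replicate]
          split_ifs <;> rfl
        exact h1.trans h2.symm
      rw [PySem.List.slice_to _ (show (0 : Int) ≤ m + 1 by omega), pvReadout, List.nil_append]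
      suffices h : pvInv N
          ((PySem.List.pyRange 0 (x.length : Int) 1).foldl (fun r l1 =>
            (PySem.List.pyRange 0 (y.length : Int) 1).foldl (fun r l2 =>
              (PySem.List.pyRange |l1 - l2| (min (l1 + l2) m + 1) 1).foldl (fun r l =>
                PySem.List.pySetD r l (PySem.List.pyGetD r l 0 + PySem.List.pyGetD x l1 0 * PySem.List.pyGetD y l2 0)) r) r)
            (List.replicate (m + 1).toNat 0))
          ((PySem.List.enumerate x 0).foldl (fun diff p =>
            (PySem.List.enumerate y 0).foldl (fun diff q =>
              if |p.1 - q.1| ≤ min (p.1 + q.1) m then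
                PySem.List.pySetD (PySem.List.pySetD diff |p.1 - q.1| (PySem.List.pyGetD diff |p.1 - q.1| 0 + p.2 * q.2)) (min (p.1 + q.1) m + 1)
                  (PySem.List.pyGetD (PySem.List.pySetD diff |p.1 - q.1| (PySem.List.pyGetD diff |p.1 - q.1| 0 + p.2 * q.2)) (min (p.1 + q.1) m + 1) 0 - p.2 * q.2)
              else diff) diff) (List.replicate (m + 1 + 1).toNat 0)) by
        obtain ⟨hAr, hBd, hinv⟩ := h
        apply List.ext_getElem
        · rw [hAr, pvPsum_length, List.length_take, hBd]; omega
        · intro i h1 h2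
          have hiN : i < N := by rw [hAr] at h1; exact h1
          rw [← List.getD_eq_getElem _ 0 h1, ← List.getD_eq_getElem _ 0 h2,
              hinv i hiN, pvPsum_getD _ _ _ (by rw [List.length_take, hBd]; omega), zero_add]
          unfold pvPsumAt
          refine Finset.sum_congr rfl fun k hk => ?_
          rw [Finset.mem_range] at hk
          conv_rhs => rw [List.getD_eq_getElem?_getD, List.getElem?_take]
          rw [if_pos (show k < (m + 1).toNat by omega), ← List.getD_eq_getElem?_getD]
      simp only [PySem.List.enumerate_eq_map_pyRange x (0 : Int),
        PySem.List.enumerate_eq_map_pyRange y (0 : Int), List.foldl_map, PySem.List.len]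
      refine pvFoldl_rel (pvInv N) _ _ _ ?_ hInit
      intro l1 hl1 r d hrd
      obtain ⟨h1a, _⟩ := PySem.List.mem_pyRange_one.mp hl1
      refine pvFoldl_rel (pvInv N) _ _ _ ?_ hrd
      intro l2 hl2 r' d' hrd'
      obtain ⟨h2a, _⟩ := PySem.List.mem_pyRange_one.mp hl2
      exact pvPairStep N m l1 l2 (PySem.List.pyGetD x l1 0 * PySem.List.pyGetD y l2 0) hNc h1a h2a r' d' hrd'
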